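-- pv_equiv track=rewrite | github.com/SadeghHayeri/Personal | Design and Analysis of Algorithms Summary/CA2/q1/q1.py | f
-- ===== SOURCE A (Python) =====
-- def f(mem, k, space):
--     if mem[space] != -1:
--         return mem[space]
--     if space < k:
--         return 1
--     if space == k:
--         return 2
--     if space > k:
--         ans = f(mem, k, space-k) + f(mem, k, space-1)
--         mem[space] = ans
--         return ans
-- ===== SOURCE B (Python) =====
-- def f(mem, k, space):
--     if mem[space] != -1:
--         return mem[space]
--     if space < k:
--         return 1
--     if space == k:
--         return 2
--     for v in range(k + 1, space + 1):
--         if mem[v] == -1: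
--             mem[v] = _cell(mem, k, v - k) + _cell(mem, k, v - 1)
--     return mem[space]
--
-- def _cell(mem, k, u):
--     c = mem[u]
--     if c != -1:
--         return c
--     if u < k:
--         return 1
--     if u == k:
--         return 2
--     return c
-- ===== Notes on version B (the rewrite author's own statement) =====
-- stated objective: alternative
-- what changed: Top-down memoized recursion replaced by an iterative bottom-up fill of the memo table from k+1 up to space (recursion eliminated); return-value equivalent, though B may fill memo cells A's recursion never reaches.
-- outside the precondition, e.g. on f([-1, 1, -1, -1, -5, 7], -2, 0): A returns 3, B returns 6
import Mathlib
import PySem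

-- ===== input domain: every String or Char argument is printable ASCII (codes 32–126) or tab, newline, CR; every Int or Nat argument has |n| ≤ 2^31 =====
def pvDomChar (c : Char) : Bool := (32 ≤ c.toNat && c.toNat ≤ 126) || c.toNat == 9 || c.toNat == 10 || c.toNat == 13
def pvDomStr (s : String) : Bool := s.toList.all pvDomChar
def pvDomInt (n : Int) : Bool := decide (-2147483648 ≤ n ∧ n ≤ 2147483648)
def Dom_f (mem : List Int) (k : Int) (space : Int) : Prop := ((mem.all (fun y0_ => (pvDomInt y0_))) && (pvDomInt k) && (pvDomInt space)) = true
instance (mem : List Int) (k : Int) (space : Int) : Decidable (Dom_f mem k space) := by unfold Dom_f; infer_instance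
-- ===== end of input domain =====

-- B replaces A's top-down memoized recursion with an iterative bottom-up fill of the memo
-- table; the equivalence proved is about the RETURN value only (both Pythons mutate mem, but
-- B may fill memo cells that A's recursion never reaches).

-- ===== PORT A =====
-- A recurses with possibly non-decreasing arguments (it diverges in Python when k ≤ 0 and
-- the cell is uncached), so the port threads fuel; fuel space.toNat+1 suffices on Pre_f.
def fAux : Nat → List Int → Int → Int → Option (List Int × Int)
  | 0, _, _, _ => none
  | fuel+1, mem, k, space =>
    match PySem.List.pyGet? mem space with
    | none => none               -- IndexError
    | some c =>
      if c ≠ -1 then some (mem, c)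
      else if space < k then some (mem, 1)
      else if space = k then some (mem, 2)
      else
        match fAux fuel mem k (space - k) with
        | none => none
        | some (m1, a1) =>
          match fAux fuel m1 k (space - 1) with
          | none => none
          | some (m2, a2) =>
            some (PySem.List.pySetD m2 space (a1 + a2), a1 + a2)

def f (mem : List Int) (k : Int) (space : Int) : Int :=
  match fAux (space.toNat + 1) mem k space with
  | none => 0                    -- unreachable under Pre_f
  | some (_, a) => a

-- ===== PORT B =====
-- _cell from Source B
def bCell (mem : List Int) (k : Int) (u : Int) : Int :=
  let c := PySem.List.pyGetD mem u 0
  if c ≠ -1 then c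
  else if u < k then 1
  else if u = k then 2
  else c

-- one iteration of Source B's for-loop body
def bStep (k : Int) (m : List Int) (v : Int) : List Int :=
  if PySem.List.pyGetD m v 0 = -1 then
    PySem.List.pySetD m v (bCell m k (v - k) + bCell m k (v - 1))
  else m

def f_alt (mem : List Int) (k : Int) (space : Int) : Int :=
  let c := PySem.List.pyGetD mem space 0
  if c ≠ -1 then c
  else if space < k then 1
  else if space = k then 2
  else
    PySem.List.pyGetD ((PySem.List.pyRange (k + 1) (space + 1) 1).foldl (bStep k) mem) space 0

-- ===== PRECONDITION & SPEC =====
-- Pre_f excludes out-of-range space (IndexError in both programs) and the inputs where the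
-- uncached cell at space > k meets a non-positive k or a negative space: there A recurses with
-- non-decreasing arguments through negative-index wraparound (usually RecursionError or
-- IndexError, occasionally an accidental value assembled from wrapped reads).
def Pre_f (mem : List Int) (k : Int) (space : Int) : Prop :=
  PySem.Raise.InRange mem.length space ∧
  ((k < space ∧ PySem.List.pyGet? mem space = some (-1)) → (1 ≤ k ∧ 0 ≤ space))
instance (mem : List Int) (k : Int) (space : Int) : Decidable (Pre_f mem k space) := by
  unfold Pre_f; infer_instance

def pvWitness_f : List Int × Int × Int := ([-1, -1, -1, -1, -1, -1], 2, 5)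

def Spec_f (mem : List Int) (k : Int) (space : Int) (out : Int) : Prop := out = f_alt mem k space
instance (mem : List Int) (k : Int) (space : Int) (out : Int) : Decidable (Spec_f mem k space out) := by unfold Spec_f; infer_instance

-- ===== CLAIM (what is proved, stated in full; the proofs are below) =====
def Claim_equal_f : Prop := ∀ (mem : List Int) (k : Int) (space : Int), Dom_f mem k space → Pre_f mem k space → Spec_f mem k space (f mem k space)

-- ===== LEMMAS AND PROOFS =====

-- the pure memo recurrence over the INITIAL table; k is encoded as kk+1 so that it is ≥ 1
def Rr (mem : List Int) (kk : Nat) (n : Int) : Int :=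
  let c := PySem.List.pyGetD mem n 0
  if c ≠ -1 then c
  else if _h1 : n < (kk : Int) + 1 then 1
  else if _h2 : n = (kk : Int) + 1 then 2
  else Rr mem kk (n - ((kk : Int) + 1)) + Rr mem kk (n - 1)
termination_by n.toNat
decreasing_by
  · omega
  · omega

theorem Rr_def (mem : List Int) (kk : Nat) (n : Int) :
    Rr mem kk n =
      (if PySem.List.pyGetD mem n 0 ≠ -1 then PySem.List.pyGetD mem n 0
      else if n < (kk : Int) + 1 then 1
      else if n = (kk : Int) + 1 then 2
      else Rr mem kk (n - ((kk : Int) + 1)) + Rr mem kk (n - 1)) := by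
  rw [Rr]; rfl

theorem pyGetD_set (xs : List Int) (i j v : Int) (hi0 : 0 ≤ i) (_hil : i < (xs.length : Int))
    (hj0 : 0 ≤ j) (_hjl : j < (xs.length : Int)) :
    PySem.List.pyGetD (PySem.List.pySetD xs i v) j 0 =
      if j = i then v else PySem.List.pyGetD xs j 0 := by
  rw [PySem.List.pySetD_of_nonneg xs v hi0,
      PySem.List.pyGetD_eq_getElem (xs.set i.toNat v) 0 hj0 (by simpa using _hjl),
      PySem.List.pyGetD_eq_getElem xs 0 hj0 _hjl]
  rw [List.getElem_set]
  by_cases h : j = i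
  · simp [h]
  · have : i.toNat ≠ j.toNat := by omega
    simp [this, h]

theorem length_setD (xs : List Int) (i v : Int) (hi0 : 0 ≤ i) :
    (PySem.List.pySetD xs i v).length = xs.length := by
  rw [PySem.List.pySetD_of_nonneg xs v hi0]; simp

theorem pyGetD_eq_of_get? (xs : List Int) (i : Int) (x : Int)
    (h : PySem.List.pyGet? xs i = some x) : PySem.List.pyGetD xs i 0 = x := by
  simp [PySem.List.pyGetD, h]

-- state invariant of A's recursion: every cell is either untouched or holds its recurrence value
def Cons (mem0 : List Int) (kk : Nat) (m : List Int) : Prop :=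
  m.length = mem0.length ∧ ∀ i : Int, 0 ≤ i → i < (mem0.length : Int) →
    PySem.List.pyGetD m i 0 = PySem.List.pyGetD mem0 i 0 ∨
    ((kk : Int) + 1 < i ∧ PySem.List.pyGetD mem0 i 0 = -1 ∧
      PySem.List.pyGetD m i 0 = Rr mem0 kk i)

theorem cell_eq_Rr (mem0 : List Int) (kk : Nat) (m : List Int) (hc : Cons mem0 kk m)
    (n : Int) (h0 : 0 ≤ n) (hl : n < (mem0.length : Int))
    (hne : PySem.List.pyGetD m n 0 ≠ -1) :
    PySem.List.pyGetD m n 0 = Rr mem0 kk n := by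
  rcases hc.2 n h0 hl with h | ⟨_, _, h⟩
  · rw [Rr_def]; rw [h] at hne ⊢; simp [hne]
  · exact h

theorem mem0_neg_one (mem0 : List Int) (kk : Nat) (m : List Int) (hc : Cons mem0 kk m)
    (n : Int) (h0 : 0 ≤ n) (hl : n < (mem0.length : Int))
    (heq : PySem.List.pyGetD m n 0 = -1) :
    PySem.List.pyGetD mem0 n 0 = -1 := by
  rcases hc.2 n h0 hl with h | ⟨_, h, _⟩
  · rw [← h, heq]
  · exact h

theorem fAux_eq (mem0 : List Int) (kk : Nat) :
    ∀ (fuel : Nat) (m : List Int) (n : Int), Cons mem0 kk m → 0 ≤ n →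
      n < (mem0.length : Int) → n.toNat < fuel →
      ∃ m', Cons mem0 kk m' ∧
        fAux fuel m ((kk : Int) + 1) n = some (m', Rr mem0 kk n) := by
  intro fuel
  induction fuel with
  | zero => intro m n _ _ _ h; omega
  | succ fuel ih =>
    intro m n hc h0 hl hf
    have hlen : m.length = mem0.length := hc.1
    have hget : PySem.List.pyGet? m n = some (PySem.List.pyGetD m n 0) := by
      rw [PySem.List.pyGet?_eq_some_getElem m h0 (by omega),
          PySem.List.pyGetD_eq_getElem m 0 h0 (by omega)]
    by_cases hne : PySem.List.pyGetD m n 0 = -1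
    · -- uncached cell
      have hm0 : PySem.List.pyGetD mem0 n 0 = -1 := mem0_neg_one mem0 kk m hc n h0 hl hne
      by_cases hlt : n < (kk : Int) + 1
      · refine ⟨m, hc, ?_⟩
        rw [Rr_def, if_neg (by simp [hm0]), if_pos hlt]
        simp only [fAux, hget]
        rw [if_neg (not_not_intro hne), if_pos hlt]
      · by_cases heq : n = (kk : Int) + 1
        · refine ⟨m, hc, ?_⟩
          rw [Rr_def, if_neg (by simp [hm0]), if_neg hlt, if_pos heq]
          simp only [fAux, hget]
          rw [if_neg (not_not_intro hne), if_neg hlt, if_pos heq]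
        · -- recursive case: n > kk+1
          have hgt : (kk : Int) + 1 < n := by omega
          obtain ⟨m1, hc1, e1⟩ := ih m (n - ((kk : Int) + 1)) hc (by omega) (by omega) (by omega)
          obtain ⟨m2, hc2, e2⟩ := ih m1 (n - 1) hc1 (by omega) (by omega) (by omega)
          have hR : Rr mem0 kk n =
              Rr mem0 kk (n - ((kk : Int) + 1)) + Rr mem0 kk (n - 1) := by
            rw [Rr_def]; simp [hm0, hlt, heq]
          refine ⟨PySem.List.pySetD m2 n (Rr mem0 kk (n - ((kk : Int) + 1)) + Rr mem0 kk (n - 1)), ?_, ?_⟩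
          · constructor
            · rw [length_setD _ _ _ h0, hc2.1]
            · intro i hi0 hil
              rw [pyGetD_set m2 n i _ h0 (by rw [hc2.1]; exact hl) hi0 (by rw [hc2.1]; exact hil)]
              by_cases hin : i = n
              · right
                refine ⟨by omega, by rw [hin]; exact hm0, ?_⟩
                simp [hin, hR]
              · simp only [hin, if_false]
                exact hc2.2 i hi0 hil
          · simp only [fAux, hget]
            rw [if_neg (not_not_intro hne), if_neg hlt, if_neg heq]
            simp only [e1, e2, hR]
    · -- cached cell: returned as is, no mutation
      refine ⟨m, hc, ?_⟩
      have hcell := cell_eq_Rr mem0 kk m hc n h0 hl hne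
      simp only [fAux, hget]
      rw [if_pos hne, hcell]

-- bottom-up direction: _cell agrees with the recurrence on already-filled prefixes
theorem bCell_eq (mem0 m : List Int) (kk : Nat) (w : Int)
    (hdesc : ∀ i : Int, 0 ≤ i → i < (mem0.length : Int) →
      PySem.List.pyGetD m i 0 =
        if (kk : Int) + 1 < i ∧ i ≤ w then Rr mem0 kk i else PySem.List.pyGetD mem0 i 0)
    (u : Int) (hu0 : 0 ≤ u) (huw : u ≤ w) (hul : u < (mem0.length : Int)) :
    bCell m ((kk : Int) + 1) u = Rr mem0 kk u := by
  unfold bCell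
  rw [hdesc u hu0 hul]
  by_cases hK : (kk : Int) + 1 < u
  · simp only [hK, huw, and_self, if_true]
    split_ifs with h1 h2 h3 <;> first | rfl | omega
  · simp only [hK, false_and, if_false]
    rw [Rr_def]
    split_ifs with h1 h2 h3 <;> first | rfl | omega

theorem fill_spec (mem0 : List Int) (kk : Nat) :
    ∀ (j : Nat), ((kk : Int) + 1) + j < (mem0.length : Int) →
      (((PySem.List.pyRange ((kk : Int) + 1 + 1) ((((kk : Int) + 1) + j) + 1) 1).foldl
          (bStep ((kk : Int) + 1)) mem0).length = mem0.length ∧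
       ∀ i : Int, 0 ≤ i → i < (mem0.length : Int) →
        PySem.List.pyGetD ((PySem.List.pyRange ((kk : Int) + 1 + 1) ((((kk : Int) + 1) + j) + 1) 1).foldl
            (bStep ((kk : Int) + 1)) mem0) i 0 =
          if (kk : Int) + 1 < i ∧ i ≤ ((kk : Int) + 1) + j then Rr mem0 kk i
          else PySem.List.pyGetD mem0 i 0) := by
  intro j
  induction j with
  | zero =>
    intro _
    rw [PySem.List.pyRange_one_eq_nil (by omega)]
    have h0 : ∀ i : Int, ¬ ((kk : Int) + 1 < i ∧ i ≤ ((kk : Int) + 1) + (0 : Nat)) := by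
      intro i; push_cast; omega
    exact ⟨rfl, fun i _ _ => by rw [List.foldl_nil, if_neg (h0 i)]⟩
  | succ j ih =>
    intro hlen
    obtain ⟨hplen, hdesc⟩ := ih (by push_cast at hlen ⊢; omega)
    set w : Int := ((kk : Int) + 1) + (j + 1 : Nat) with hw
    have hwj : w = (((kk : Int) + 1) + (j : Nat)) + 1 := by rw [hw]; push_cast; omega
    have hsplit : PySem.List.pyRange ((kk : Int) + 1 + 1) (w + 1) 1 =
        PySem.List.pyRange ((kk : Int) + 1 + 1) ((((kk : Int) + 1) + (j : Nat)) + 1) 1 ++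
          [(((kk : Int) + 1) + (j : Nat)) + 1] := by
      rw [hwj]
      exact PySem.List.pyRange_one_succ_right (by omega)
    rw [hsplit, List.foldl_append]
    set mp := (PySem.List.pyRange ((kk : Int) + 1 + 1) ((((kk : Int) + 1) + (j : Nat)) + 1) 1).foldl
        (bStep ((kk : Int) + 1)) mem0 with hmp
    rw [← hwj]
    have hw0 : 0 ≤ w := by rw [hw]; push_cast; omega
    have hwl : w < (mem0.length : Int) := by rw [hw]; push_cast at hlen ⊢; omega
    have hmpw : PySem.List.pyGetD mp w 0 = PySem.List.pyGetD mem0 w 0 := by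
      rw [hdesc w hw0 hwl]
      have : ¬ ((kk : Int) + 1 < w ∧ w ≤ ((kk : Int) + 1) + (j : Nat)) := by
        rw [hw]; push_cast; omega
      simp [this]
    simp only [List.foldl_cons, List.foldl_nil, bStep, hmpw]
    by_cases hun : PySem.List.pyGetD mem0 w 0 = -1
    · -- the cell is uncached: it gets written with its recurrence value
      simp only [hun, if_true]
      have hb1 : bCell mp ((kk : Int) + 1) (w - ((kk : Int) + 1)) = Rr mem0 kk (w - ((kk : Int) + 1)) :=
        bCell_eq mem0 mp kk (((kk : Int) + 1) + (j : Nat)) hdesc _ (by rw [hw]; push_cast; omega)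
          (by rw [hw]; push_cast; omega) (by omega)
      have hb2 : bCell mp ((kk : Int) + 1) (w - 1) = Rr mem0 kk (w - 1) :=
        bCell_eq mem0 mp kk (((kk : Int) + 1) + (j : Nat)) hdesc _ (by rw [hw]; push_cast; omega)
          (by rw [hw]; push_cast; omega) (by omega)
      have hRw : Rr mem0 kk w = Rr mem0 kk (w - ((kk : Int) + 1)) + Rr mem0 kk (w - 1) := by
        rw [Rr_def]
        have h1 : ¬ w < (kk : Int) + 1 := by rw [hw]; push_cast; omega
        have h2 : ¬ w = (kk : Int) + 1 := by rw [hw]; push_cast; omega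
        simp [hun, h1, h2]
      constructor
      · rw [length_setD _ _ _ hw0, hplen]
      · intro i hi0 hil
        rw [pyGetD_set mp w i _ hw0 (by rw [hplen]; exact hwl) hi0 (by rw [hplen]; exact hil)]
        by_cases hiw : i = w
        · rw [if_pos hiw, hb1, hb2, ← hRw, hiw,
            if_pos (show (kk : Int) + 1 < w ∧ w ≤ w from ⟨by rw [hw]; push_cast; omega, le_rfl⟩)]
        · simp only [hiw, if_false]
          rw [hdesc i hi0 hil]
          have : ((kk : Int) + 1 < i ∧ i ≤ ((kk : Int) + 1) + (j : Nat)) ↔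
              ((kk : Int) + 1 < i ∧ i ≤ w) := by rw [hw]; push_cast; constructor <;> (intro h; constructor <;> omega)
          rw [if_congr this rfl rfl]
    · -- cached cell: no write, and the invariant extends because Rr returns the cache
      simp only [hun, if_false]
      refine ⟨hplen, fun i hi0 hil => ?_⟩
      rw [hdesc i hi0 hil]
      by_cases hiw : i = w
      · have h1 : ¬ ((kk : Int) + 1 < i ∧ i ≤ ((kk : Int) + 1) + (j : Nat)) := by
          rw [hiw, hw]; push_cast; omega
        have h2 : (kk : Int) + 1 < i ∧ i ≤ w := by rw [hiw, hw]; push_cast; omega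
        rw [if_neg h1, if_pos h2]
        rw [Rr_def, hiw]
        simp [hun]
      · have : ((kk : Int) + 1 < i ∧ i ≤ ((kk : Int) + 1) + (j : Nat)) ↔
            ((kk : Int) + 1 < i ∧ i ≤ w) := by rw [hw]; push_cast; constructor <;> (intro h; constructor <;> omega)
        rw [if_congr this rfl rfl]

-- ===== VERDICT (by name: the statement is the Claim_ definition above) =====
theorem f_spec : Claim_equal_f := by
  intro mem k space _hdom hpre
  obtain ⟨hinr, himp⟩ := hpre
  unfold Spec_f
  obtain ⟨x, hx⟩ : ∃ x, PySem.List.pyGet? mem space = some x := by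
    cases h : PySem.List.pyGet? mem space with
    | none => exact absurd hinr (by rwa [← PySem.List.pyGet?_eq_none_iff])
    | some x => exact ⟨x, rfl⟩
  have hxD : PySem.List.pyGetD mem space 0 = x := pyGetD_eq_of_get? mem space x hx
  by_cases hxe : x = -1
  · by_cases hlt : space < k
    · -- base case: both return 1
      unfold f f_alt
      simp [fAux, hx, hxe, hxD, hlt]
    · by_cases heq : space = k
      · unfold f f_alt
        simp only [fAux, hx, hxD, hxe]
        simp [heq]
      · -- recursive case
        have hk : k < space := by
          rcases lt_trichotomy k space with h | h | h
          · exact h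
          · exact absurd h.symm heq
          · omega
        obtain ⟨hk1, hs0⟩ := himp ⟨hk, by rw [hx, hxe]⟩
        set kk : Nat := (k - 1).toNat with hkk
        have hkek : (kk : Int) + 1 = k := by rw [hkk]; omega
        have hsl : space < (mem.length : Int) := by
          rcases hinr with ⟨_, h⟩; exact_mod_cast h
        have hcons : Cons mem kk mem := ⟨rfl, fun i _ _ => Or.inl rfl⟩
        obtain ⟨m', _, he⟩ := fAux_eq mem kk (space.toNat + 1) mem space hcons hs0 hsl (by omega)
        rw [hkek] at he
        set j : Nat := (space - k).toNat with hj
        have hje : ((kk : Int) + 1) + (j : Nat) = space := by rw [hj, hkek]; omega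
        obtain ⟨_, hdesc⟩ := fill_spec mem kk j (by rw [hje]; exact hsl)
        have hfin := hdesc space hs0 hsl
        rw [if_pos ⟨by omega, le_of_eq hje.symm⟩] at hfin
        rw [hje, hkek] at hfin
        unfold f f_alt
        rw [he]
        simp only [hxD, hxe]
        rw [if_neg (by simp), if_neg hlt, if_neg heq]
        exact hfin.symm
  · -- cached: both return the cached value
    unfold f f_alt
    simp [fAux, hx, hxD, hxe]
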